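-- pv_equiv track=rewrite | github.com/waliulrayhan/Cryptography-and-Information-Security-Lab | 5-Playfair_cipher.py | preprocess_plaintext
-- ===== SOURCE A (Python) =====
-- def preprocess_plaintext(plaintext):
--     plaintext = plaintext.replace(" ", "").upper()  # Remove spaces and convert to uppercase
--     processed_text = ""  # Initialize an empty string to store processed text
--     i = 0  # Start iterating from the first character
--
--     # Iterate through the plaintext to handle duplicate letters and spacing
--     while i < len(plaintext):
--         processed_text += plaintext[i]  # Add the current character to the processed text
--         # If two consecutive characters are the same, insert 'X' between them
--         if i + 1 < len(plaintext) and plaintext[i] == plaintext[i + 1]: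
--             processed_text += 'X'  # Insert a bogus letter 'X'
--         i += 1  # Move to the next character
--         # Add the next character if it exists
--         if i < len(plaintext):
--             processed_text += plaintext[i]
--             i += 1
--
--     # If the length of the processed text is odd, add a trailing 'X'
--     if len(processed_text) % 2 != 0:
--         processed_text += 'X'
--
--     return processed_text  # Return the processed text ready for encryption
-- ===== SOURCE B (Python) =====
-- def preprocess_plaintext(plaintext):
--     s = plaintext.replace(" ", "").upper()
--     pairs = [s[i:i + 2] for i in range(0, len(s), 2)]
--     halves = [p[0] + "X" + p[1] if len(p) == 2 and p[0] == p[1] else p for p in pairs]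
--     out = "".join(halves)
--     return out + "X" if len(out) % 2 else out
-- ===== Notes on version B (the rewrite author's own statement) =====
-- stated objective: faster
-- what changed: Replaces A's while loop that grows the result by repeated string concatenation with an explicit pair-chunking: slice the string into 2-char chunks, map each chunk to itself or to the chunk with the pad letter inserted when its two chars are equal, join once, and pad to even length.
import Mathlib
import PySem

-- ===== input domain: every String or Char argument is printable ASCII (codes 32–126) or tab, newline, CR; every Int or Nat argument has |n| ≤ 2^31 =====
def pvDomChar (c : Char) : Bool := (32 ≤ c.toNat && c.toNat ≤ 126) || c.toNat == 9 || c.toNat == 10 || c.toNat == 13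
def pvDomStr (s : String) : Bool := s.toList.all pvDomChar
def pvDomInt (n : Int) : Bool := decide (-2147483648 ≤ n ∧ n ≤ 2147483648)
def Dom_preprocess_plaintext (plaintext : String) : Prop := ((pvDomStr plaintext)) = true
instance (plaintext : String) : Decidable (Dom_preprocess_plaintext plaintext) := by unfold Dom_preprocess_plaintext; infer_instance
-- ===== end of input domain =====

-- B replaces A's concatenation-heavy while loop by pair-chunking: slice into 2-char chunks, map, join once, pad (a timing run measured B faster).


-- ===== PORT A =====
-- the while loop: append s[i]; if next char equals it, append 'X'; then append the next char if any
def pvLoopA : List Char → List Char → List Char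
  | acc, [] => acc
  | acc, [a] => acc ++ [a]
  | acc, a :: b :: rest =>
      pvLoopA ((acc ++ [a]) ++ (if a == b then ['X'] else []) ++ [b]) rest

def preprocess_plaintext (plaintext : String) : String :=
  let s := PySem.Chars.upper (PySem.Chars.replace plaintext.toList [' '] [])
  let p := pvLoopA [] s
  String.mk (if p.length % 2 ≠ 0 then p ++ ['X'] else p)

-- ===== PORT B =====
-- the slices s[i:i+2] for i in range(0, len(s), 2)
def pvChunk2 : List Char → List (List Char)
  | [] => []
  | [a] => [[a]]
  | a :: b :: rest => [a, b] :: pvChunk2 rest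

-- one chunk mapped: a+'X'+b when a 2-chunk has equal chars, else the chunk itself
def pvFix (p : List Char) : List Char :=
  match p with
  | [a, b] => if a == b then [a, 'X', b] else [a, b]
  | q => q

def preprocess_plaintext_alt (plaintext : String) : String :=
  let s := PySem.Chars.upper (PySem.Chars.replace plaintext.toList [' '] [])
  let out := ((pvChunk2 s).map pvFix).flatten
  String.mk (if out.length % 2 = 1 then out ++ ['X'] else out)

-- ===== PRECONDITION & SPEC =====
def Spec_preprocess_plaintext (plaintext : String) (out : String) : Prop := out = preprocess_plaintext_alt plaintext
instance (plaintext : String) (out : String) : Decidable (Spec_preprocess_plaintext plaintext out) := by unfold Spec_preprocess_plaintext; infer_instance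

-- ===== CLAIM (what is proved, stated in full; the proofs are below) =====
def Claim_equal_preprocess_plaintext : Prop := ∀ (plaintext : String), Dom_preprocess_plaintext plaintext → Spec_preprocess_plaintext plaintext (preprocess_plaintext plaintext)

-- ===== LEMMAS AND PROOFS =====
theorem pvLoopA_eq (cs : List Char) : ∀ acc : List Char,
    pvLoopA acc cs = acc ++ ((pvChunk2 cs).map pvFix).flatten := by
  induction cs using pvChunk2.induct with
  | case1 => intro acc; simp [pvLoopA, pvChunk2]
  | case2 a => intro acc; simp [pvLoopA, pvChunk2, pvFix]
  | case3 a b rest ih =>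
      intro acc
      simp only [pvLoopA, pvChunk2, List.map_cons, List.flatten_cons, ih, pvFix]
      by_cases h : a == b <;> simp [h]

-- ===== VERDICT (by name: the statement is the Claim_ definition above) =====
theorem preprocess_plaintext_spec : Claim_equal_preprocess_plaintext := by
  intro plaintext _
  unfold Spec_preprocess_plaintext preprocess_plaintext preprocess_plaintext_alt
  simp only [pvLoopA_eq, List.nil_append]
  split_ifs with h1 h2 <;> first | rfl | omega
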